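-- pv_equiv track=rewrite | github.com/NguyenMinhQuan77/quan | buoi10_ThucHanh2/socket_servers.py | chuan_hoa_xau
-- ===== SOURCE A (Python) =====
-- def chuan_hoa_xau(s):
--     # Loại bỏ khoảng trắng thừa
--     s = ' '.join(s.split())
--
--     # Chuẩn hóa khoảng trắng sau dấu chấm, dấu phẩy
--     s = s.replace(' ,', ',').replace(' .', '.').replace(',', ', ').replace('.', '. ')
--
--     # Xử lý viết hoa ký tự đầu tiên của xâu và ký tự đầu sau dấu chấm
--     s = s.strip()
--     s = s.capitalize()
--
--     # Viết hoa chữ cái sau dấu chấm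
--     new_s = ''
--     capitalize_next = False
--     for i in range(len(s)):
--         if capitalize_next and s[i].isalpha():
--             new_s += s[i].upper()
--             capitalize_next = False
--         else:
--             new_s += s[i]
--         if s[i] == '.':
--             capitalize_next = True
--
--     # Thêm dấu chấm cuối câu nếu chưa có
--     if not new_s.endswith('.'):
--         new_s += '.'
--
--     return new_s
-- ===== SOURCE B (Python) =====
-- def chuan_hoa_xau(s):
--     # Same whitespace/punctuation pipeline, then segment-wise capitalization:
--     # split on '.', uppercase the first letter position of each segment, rejoin.
--     s = ' '.join(s.split())
--     s = s.replace(' ,', ',').replace(' .', '.').replace(',', ', ').replace('.', '. ')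
--     s = s.strip().lower()
--     out = []
--     for idx, seg in enumerate(s.split('.')):
--         if idx == 0:
--             out.append(seg[:1].upper() + seg[1:])
--         else:
--             chars = list(seg)
--             for j, c in enumerate(chars):
--                 if c.isalpha():
--                     chars[j] = c.upper()
--                     break
--             out.append(''.join(chars))
--     res = '.'.join(out)
--     if not res.endswith('.'):
--         res += '.'
--     return res
-- ===== Notes on version B (the rewrite author's own statement) =====
-- stated objective: idiomatic
-- what changed: A's character-by-character loop with a capitalize_next flag (appending one character at a time) is replaced by splitting the normalized string on periods, uppercasing the first letter of each segment (first segment: first character, later segments: first alphabetic character), and rejoining the whole segments.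
import Mathlib
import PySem

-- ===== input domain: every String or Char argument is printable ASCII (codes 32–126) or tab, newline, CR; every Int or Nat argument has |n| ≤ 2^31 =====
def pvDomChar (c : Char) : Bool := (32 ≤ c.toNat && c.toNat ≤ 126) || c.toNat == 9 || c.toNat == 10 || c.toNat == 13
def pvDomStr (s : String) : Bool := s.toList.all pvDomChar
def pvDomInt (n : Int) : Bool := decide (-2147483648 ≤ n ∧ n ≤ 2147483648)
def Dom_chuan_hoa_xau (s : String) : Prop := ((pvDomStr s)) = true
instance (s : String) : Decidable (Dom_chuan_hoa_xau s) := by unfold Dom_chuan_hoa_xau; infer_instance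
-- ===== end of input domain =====

-- B replaces A's char-by-char flag loop with an idiomatic split-on-'.' / fix-each-segment / rejoin decomposition (objective: idiomatic).

-- ===== PORT A =====
-- Python str.capitalize (first char title-cased, rest lowered); exact on the ASCII domain, where titlecase = uppercase.
def pvCapitalize (cs : List Char) : List Char :=
  match cs with
  | [] => []
  | c :: r => PySem.Chars.upperChar c :: PySem.Chars.lower r

def chuan_hoa_xau (s : String) : String :=
  let s1 := PySem.Chars.join [' '] (PySem.Chars.split₀ s.toList)
  let s2 := PySem.Chars.replace (PySem.Chars.replace (PySem.Chars.replace
              (PySem.Chars.replace s1 [' ', ','] [',']) [' ', '.'] ['.']) [','] [',', ' ']) ['.'] ['.', ' ']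
  let s3 := pvCapitalize (PySem.Chars.strip s2)
  let r := s3.foldl (fun (acc : List Char × Bool) c =>
      let p := if acc.2 && PySem.Chars.isalpha c then (acc.1 ++ [PySem.Chars.upperChar c], false)
               else (acc.1 ++ [c], acc.2)
      (p.1, if c = '.' then true else p.2)) ([], false)
  String.ofList (if PySem.Chars.endswith r.1 ['.'] then r.1 else r.1 ++ ['.'])

-- ===== PORT B =====
-- Source B's inner loop: uppercase the first alphabetic character of a segment, then break.
def pvUpFirstAlpha : List Char → List Char
  | [] => []
  | c :: r => if PySem.Chars.isalpha c then PySem.Chars.upperChar c :: r else c :: pvUpFirstAlpha r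

def chuan_hoa_xau_alt (s : String) : String :=
  let s1 := PySem.Chars.join [' '] (PySem.Chars.split₀ s.toList)
  let s2 := PySem.Chars.replace (PySem.Chars.replace (PySem.Chars.replace
              (PySem.Chars.replace s1 [' ', ','] [',']) [' ', '.'] ['.']) [','] [',', ' ']) ['.'] ['.', ' ']
  let s3 := PySem.Chars.lower (PySem.Chars.strip s2)
  let segs := PySem.Chars.splitOn s3 ['.']
  let out := (PySem.List.enumerate segs).map (fun ie =>
      if ie.1 = 0 then PySem.Chars.upper (ie.2.take 1) ++ ie.2.drop 1 else pvUpFirstAlpha ie.2)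
  let res := PySem.Chars.join ['.'] out
  String.ofList (if PySem.Chars.endswith res ['.'] then res else res ++ ['.'])

-- ===== PRECONDITION & SPEC =====
def Spec_chuan_hoa_xau (s : String) (out : String) : Prop := out = chuan_hoa_xau_alt s
instance (s : String) (out : String) : Decidable (Spec_chuan_hoa_xau s out) := by unfold Spec_chuan_hoa_xau; infer_instance

-- ===== CLAIM (what is proved, stated in full; the proofs are below) =====
def Claim_equal_chuan_hoa_xau : Prop := ∀ (s : String), Dom_chuan_hoa_xau s → Spec_chuan_hoa_xau s (chuan_hoa_xau s)

-- ===== LEMMAS AND PROOFS =====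

-- structural splitter: (head segment of l before the first '.', the remaining segments)
-- and the emission function of A's flag loop from state `flag`
def pvSp : List Char → List Char × List (List Char)
  | [] => ([], [])
  | c :: r => let p := pvSp r; if c = '.' then ([], p.1 :: p.2) else (c :: p.1, p.2)

def pvSpec : Bool → List Char → List Char
  | _, [] => []
  | flag, c :: r =>
      if flag && PySem.Chars.isalpha c then PySem.Chars.upperChar c :: pvSpec false r
      else c :: pvSpec (if c = '.' then true else flag) r

theorem pv_char_le (a b : Char) : (a ≤ b) ↔ a.toNat ≤ b.toNat := by
  rw [Char.le_def, UInt32.le_iff_toNat_le]; rfl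

theorem pv_toNat_of_lt {n : Nat} (h : n < 55296) : (Char.ofNat n).toNat = n := by
  rw [Char.toNat_ofNat, if_pos (Or.inl h)]

theorem pv_char_eq_iff (a b : Char) : a = b ↔ a.toNat = b.toNat := by
  constructor
  · intro h; rw [h]
  · intro h; apply Char.ext; apply UInt32.toNat_inj.mp; exact h

theorem pv_upper_lower (c : Char) :
    PySem.Chars.upperChar (PySem.Chars.lowerChar c) = PySem.Chars.upperChar c := by
  simp only [PySem.Chars.upperChar, PySem.Chars.lowerChar, PySem.Chars.islower, PySem.Chars.isupper,
    Bool.and_eq_true, decide_eq_true_eq, pv_char_le]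
  have ha : ('a').toNat = 97 := rfl
  have hz : ('z').toNat = 122 := rfl
  have hA : ('A').toNat = 65 := rfl
  have hZ : ('Z').toNat = 90 := rfl
  rw [ha, hz, hA, hZ]
  by_cases hu : 65 ≤ c.toNat ∧ c.toNat ≤ 90
  · rw [if_pos hu]
    have h32 : (Char.ofNat (c.toNat + 32)).toNat = c.toNat + 32 := pv_toNat_of_lt (by omega)
    rw [h32]
    rw [if_pos (by omega), if_neg (by omega)]
    rw [pv_char_eq_iff, pv_toNat_of_lt (by omega)]
    omega
  · rw [if_neg hu]

theorem pv_lower_dot (c : Char) : PySem.Chars.lowerChar c = '.' ↔ c = '.' := by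
  simp only [PySem.Chars.lowerChar, PySem.Chars.isupper, Bool.and_eq_true, decide_eq_true_eq, pv_char_le]
  have hA : ('A').toNat = 65 := rfl
  have hZ : ('Z').toNat = 90 := rfl
  rw [hA, hZ]
  by_cases hu : 65 ≤ c.toNat ∧ c.toNat ≤ 90
  · rw [if_pos hu, pv_char_eq_iff, pv_char_eq_iff, pv_toNat_of_lt (by omega)]
    rw [show ('.').toNat = 46 from rfl]
    omega
  · rw [if_neg hu]

theorem pv_upper_dot (c : Char) : PySem.Chars.upperChar c = '.' ↔ c = '.' := by
  simp only [PySem.Chars.upperChar, PySem.Chars.islower, Bool.and_eq_true, decide_eq_true_eq, pv_char_le]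
  have ha : ('a').toNat = 97 := rfl
  have hz : ('z').toNat = 122 := rfl
  rw [ha, hz]
  by_cases hl : 97 ≤ c.toNat ∧ c.toNat ≤ 122
  · rw [if_pos hl, pv_char_eq_iff, pv_char_eq_iff, pv_toNat_of_lt (by omega)]
    rw [show ('.').toNat = 46 from rfl]
    omega
  · rw [if_neg hl]

theorem pv_loop (cs : List Char) : ∀ (acc : List Char) (flag : Bool),
    (cs.foldl (fun (acc : List Char × Bool) c =>
      let p := if acc.2 && PySem.Chars.isalpha c then (acc.1 ++ [PySem.Chars.upperChar c], false)
               else (acc.1 ++ [c], acc.2)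
      (p.1, if c = '.' then true else p.2)) (acc, flag)).1 = acc ++ pvSpec flag cs := by
  induction cs with
  | nil => intro acc flag; simp [pvSpec]
  | cons c r ih =>
    have halpha : PySem.Chars.isalpha '.' = false := by decide
    intro acc flag
    rw [List.foldl_cons]
    by_cases h : (flag && PySem.Chars.isalpha c) = true
    · have hc : c ≠ '.' := fun hd => by subst hd; rw [halpha, Bool.and_false] at h; cases h
      simp only [h, if_true, if_neg hc]
      rw [ih]
      simp [pvSpec, h, List.append_assoc]
    · simp only [h]
      rw [ih]
      by_cases hd : c = '.'
      · subst hd; simp [pvSpec, halpha, List.append_assoc]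
      · simp [pvSpec, h, hd, List.append_assoc]

theorem pv_go (fuel : Nat) : ∀ (l cur : List Char) (acc : List (List Char)), l.length < fuel →
    PySem.Chars.splitOn.go ['.'] fuel l cur acc
      = acc.reverse ++ ((cur.reverse ++ (pvSp l).1) :: (pvSp l).2) := by
  induction fuel with
  | zero => intro l cur acc h; omega
  | succ f ih =>
    intro l cur acc h
    match l with
    | [] => rw [PySem.Chars.splitOn.go.eq_def]; simp [pvSp]
    | c :: rest =>
      rw [PySem.Chars.splitOn.go.eq_def]
      simp only [List.isPrefixOf]
      by_cases hd : c = '.'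
      · subst hd
        rw [if_pos (by simp)]
        rw [ih _ _ _ (by simpa using Nat.lt_of_succ_lt_succ h)]
        simp [pvSp]
      · rw [if_neg (by simp; intro hh; exact hd hh.symm)]
        rw [ih _ _ _ (by simpa using Nat.lt_of_succ_lt_succ h)]
        simp [pvSp, hd]

theorem pv_splitOn (l : List Char) :
    PySem.Chars.splitOn l ['.'] = (pvSp l).1 :: (pvSp l).2 := by
  show PySem.Chars.splitOn.go ['.'] (l.length + 1) l [] [] = _
  rw [pv_go (l.length + 1) l [] [] (by omega)]
  simp

theorem pv_join_cons_head (x : Char) (h : List Char) (t : List (List Char)) :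
    PySem.Chars.join ['.'] ((x :: h) :: t) = x :: PySem.Chars.join ['.'] (h :: t) := by
  cases t with
  | nil => rw [PySem.Chars.join_singleton, PySem.Chars.join_singleton]
  | cons q rest => rw [PySem.Chars.join_cons_cons, PySem.Chars.join_cons_cons]; simp

theorem pv_spec_join (cs : List Char) : ∀ flag,
    pvSpec flag cs = PySem.Chars.join ['.']
      ((if flag then pvUpFirstAlpha (pvSp cs).1 else (pvSp cs).1) :: (pvSp cs).2.map pvUpFirstAlpha) := by
  induction cs with
  | nil => intro flag; cases flag <;> simp [pvSpec, pvSp, pvUpFirstAlpha, PySem.Chars.join_singleton]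
  | cons c r ih =>
    have halpha : PySem.Chars.isalpha '.' = false := by decide
    intro flag
    by_cases hd : c = '.'
    · subst hd
      have h1 : pvSpec flag ('.' :: r) = '.' :: pvSpec true r := by simp [pvSpec, halpha]
      have h2 : pvSp ('.' :: r) = ([], (pvSp r).1 :: (pvSp r).2) := by simp [pvSp]
      rw [h1, ih true, h2]
      cases flag <;> simp [pvUpFirstAlpha, PySem.Chars.join_cons_cons]
    · have h2 : pvSp (c :: r) = (c :: (pvSp r).1, (pvSp r).2) := by simp [pvSp, hd]
      by_cases ha : PySem.Chars.isalpha c = true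
      · cases flag
        · have h1 : pvSpec false (c :: r) = c :: pvSpec false r := by simp [pvSpec, hd]
          rw [h1, ih false, h2, if_neg (by simp), if_neg (by simp), pv_join_cons_head]
        · have h1 : pvSpec true (c :: r) = PySem.Chars.upperChar c :: pvSpec false r := by
            simp [pvSpec, ha]
          rw [h1, ih false, h2, if_neg (by simp), if_pos rfl,
            show pvUpFirstAlpha (c :: (pvSp r).1) = PySem.Chars.upperChar c :: (pvSp r).1 by
              simp [pvUpFirstAlpha, ha],
            pv_join_cons_head]
      · have h1 : ∀ fl, pvSpec fl (c :: r) = c :: pvSpec fl r := fun fl => by simp [pvSpec, ha, hd]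
        cases flag
        · rw [h1 false, ih false, h2, if_neg (by simp), if_neg (by simp), pv_join_cons_head]
        · rw [h1 true, ih true, h2, if_pos rfl, if_pos rfl,
            show pvUpFirstAlpha (c :: (pvSp r).1) = c :: pvUpFirstAlpha (pvSp r).1 by
              simp [pvUpFirstAlpha, ha],
            pv_join_cons_head]

theorem pv_enum (rest : List (List Char)) : ∀ (n : Int), 1 ≤ n →
    (PySem.List.enumerate rest n).map (fun ie =>
        if ie.1 = 0 then PySem.Chars.upper (ie.2.take 1) ++ ie.2.drop 1 else pvUpFirstAlpha ie.2)
      = rest.map pvUpFirstAlpha := by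
  induction rest with
  | nil => intro n _; simp [PySem.List.enumerate]
  | cons h t ih =>
    intro n hn
    rw [show PySem.List.enumerate (h :: t) n = (n, h) :: PySem.List.enumerate t (n + 1) from rfl]
    rw [List.map_cons, ih (n + 1) (by omega)]
    simp [show ¬(n = 0) by omega]

theorem pv_main (t : List Char) :
    pvSpec false (pvCapitalize t)
      = PySem.Chars.join ['.'] ((PySem.List.enumerate (PySem.Chars.splitOn (PySem.Chars.lower t) ['.'])).map (fun ie =>
          if ie.1 = 0 then PySem.Chars.upper (ie.2.take 1) ++ ie.2.drop 1 else pvUpFirstAlpha ie.2)) := by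
  have halpha : PySem.Chars.isalpha '.' = false := by decide
  rw [pv_splitOn]
  rw [show PySem.List.enumerate ((pvSp (PySem.Chars.lower t)).1 :: (pvSp (PySem.Chars.lower t)).2)
        = (0, (pvSp (PySem.Chars.lower t)).1) :: PySem.List.enumerate (pvSp (PySem.Chars.lower t)).2 1 from rfl]
  rw [List.map_cons, pv_enum _ 1 (by omega)]
  simp
  cases t with
  | nil => simp [pvSpec, pvCapitalize, PySem.Chars.lower, pvSp, PySem.Chars.upper,
      PySem.Chars.join_singleton]
  | cons c r =>
    have hlow : PySem.Chars.lower (c :: r) = PySem.Chars.lowerChar c :: PySem.Chars.lower r := by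
      simp [PySem.Chars.lower]
    by_cases hd : c = '.'
    · subst hd
      rw [hlow, show PySem.Chars.lowerChar '.' = '.' from by decide]
      rw [show pvCapitalize ('.' :: r) = '.' :: PySem.Chars.lower r from by
        simp [pvCapitalize]; decide]
      rw [show pvSpec false ('.' :: PySem.Chars.lower r) = '.' :: pvSpec true (PySem.Chars.lower r) from by
        simp [pvSpec, halpha]]
      rw [pv_spec_join _ true]
      rw [show pvSp ('.' :: PySem.Chars.lower r)
            = ([], (pvSp (PySem.Chars.lower r)).1 :: (pvSp (PySem.Chars.lower r)).2) from by simp [pvSp]]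
      simp [PySem.Chars.upper, PySem.Chars.join_cons_cons]
    · have hld : PySem.Chars.lowerChar c ≠ '.' := fun h => hd ((pv_lower_dot c).mp h)
      have hud : PySem.Chars.upperChar c ≠ '.' := fun h => hd ((pv_upper_dot c).mp h)
      rw [hlow]
      rw [show pvCapitalize (c :: r) = PySem.Chars.upperChar c :: PySem.Chars.lower r from rfl]
      rw [show pvSpec false (PySem.Chars.upperChar c :: PySem.Chars.lower r)
            = PySem.Chars.upperChar c :: pvSpec false (PySem.Chars.lower r) from by
        simp [pvSpec, hud]]
      rw [pv_spec_join _ false]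
      rw [show pvSp (PySem.Chars.lowerChar c :: PySem.Chars.lower r)
            = (PySem.Chars.lowerChar c :: (pvSp (PySem.Chars.lower r)).1,
               (pvSp (PySem.Chars.lower r)).2) from by simp [pvSp, hld]]
      simp [PySem.Chars.upper, pv_upper_lower, pv_join_cons_head]

-- ===== VERDICT (by name: the statement is the Claim_ definition above) =====
theorem chuan_hoa_xau_spec : Claim_equal_chuan_hoa_xau := by
  intro s _
  unfold Spec_chuan_hoa_xau
  simp only [chuan_hoa_xau, chuan_hoa_xau_alt]
  rw [pv_loop _ [] false, List.nil_append, pv_main]
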